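-- pv_equiv track=rewrite | github.com/fightj/algorithm | 25.10.19 n^2 배열 자르기.py | solution
-- ===== SOURCE A (Python) =====
-- def solution(n, left, right):
--     answer = []
--     for k in range(left, right + 1):
--         row = k // n
--         col = k % n
--         # arr[row][col]에 들어갈 값을 arr 패턴 기반으로 계산
--
--         val = max(row, col) + 1
--         answer.append(val)
--     return answer
-- ===== SOURCE B (Python) =====
-- def solution(n, left, right):
--     if left > right:
--         return []
--     answer = []
--     for row in range(left // n, right // n + 1):
--         base = row * n
--         lo = max(left, base) - base
--         hi = min(right, base + n - 1) - base
--         run_end = min(hi, row)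
--         if lo <= run_end:
--             answer.extend([row + 1] * (run_end - lo + 1))
--         answer.extend(col + 1 for col in range(max(lo, row + 1), hi + 1))
--     return answer
-- ===== Notes on version B (the rewrite author's own statement) =====
-- stated objective: alternative
-- what changed: Instead of computing row = k//n and col = k%n separately for every flat index k, B loops once per ROW of the n*n pattern and emits each row's contribution to the window as two arithmetic segments: a constant run of row+1 (columns up to the diagonal) and an increasing tail col+1, so the per-element divisions disappear.
-- outside the precondition, e.g. on solution(-2, 0, 3): A returns [1, 0, 1, 0], B returns []
import Mathlib
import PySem

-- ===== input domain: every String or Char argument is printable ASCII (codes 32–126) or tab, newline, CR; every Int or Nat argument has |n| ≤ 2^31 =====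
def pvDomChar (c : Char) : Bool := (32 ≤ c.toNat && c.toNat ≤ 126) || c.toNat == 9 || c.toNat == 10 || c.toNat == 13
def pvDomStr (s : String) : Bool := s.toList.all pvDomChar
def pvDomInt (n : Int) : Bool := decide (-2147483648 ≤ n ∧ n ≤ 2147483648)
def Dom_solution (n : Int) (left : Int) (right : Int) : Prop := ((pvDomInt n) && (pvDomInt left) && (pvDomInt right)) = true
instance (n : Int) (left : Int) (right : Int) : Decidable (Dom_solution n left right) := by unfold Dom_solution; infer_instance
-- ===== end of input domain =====

-- B replaces A's per-element k//n, k%n computation by a per-row loop that emits each row's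
-- window contribution as a constant run (row+1) plus an increasing tail (col+1) — alternative decomposition, same cost.


-- ===== PORT A =====
-- for k in range(left, right+1): answer.append(max(k//n, k%n) + 1)
def solution (n : Int) (left : Int) (right : Int) : List Int :=
  (PySem.List.pyRange left (right + 1) 1).foldl
    (fun answer k =>
      answer ++ [max (PySem.Int.floordiv k n) (PySem.Int.mod k n) + 1]) []

-- ===== PORT B =====
-- if left > right: []; else per-row: constant run of row+1, then increasing tail col+1
def solution_alt (n : Int) (left : Int) (right : Int) : List Int :=
  if left > right then []
  else
    (PySem.List.pyRange (PySem.Int.floordiv left n) (PySem.Int.floordiv right n + 1) 1).foldl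
      (fun answer row =>
        let base := row * n
        let lo := max left base - base
        let hi := min right (base + n - 1) - base
        let runEnd := min hi row
        (if lo ≤ runEnd then answer ++ List.replicate (runEnd - lo + 1).toNat (row + 1)
         else answer)
        ++ (PySem.List.pyRange (max lo (row + 1)) (hi + 1) 1).map (fun col => col + 1)) []

-- ===== PRECONDITION & SPEC =====
-- Pre_ restricts to the puzzle's natural domain: a positive side length n (or an empty window,
-- where no division happens).  For n = 0 with left ≤ right A raises ZeroDivisionError (so must
-- be excluded); a negative n is a meaningless side length for the n×n pattern array, and A's
-- values there are floor-division artefacts B does not reproduce (see cites).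
def Pre_solution (n : Int) (left : Int) (right : Int) : Prop := 1 ≤ n ∨ right < left
instance (n : Int) (left : Int) (right : Int) : Decidable (Pre_solution n left right) := by unfold Pre_solution; infer_instance
def pvWitness_solution : Int × Int × Int := (3, 2, 7)
def Spec_solution (n : Int) (left : Int) (right : Int) (out : List Int) : Prop := out = solution_alt n left right
instance (n : Int) (left : Int) (right : Int) (out : List Int) : Decidable (Spec_solution n left right out) := by unfold Spec_solution; infer_instance

-- ===== CLAIM (what is proved, stated in full; the proofs are below) =====
def Claim_equal_solution : Prop := ∀ (n : Int) (left : Int) (right : Int), Dom_solution n left right → Pre_solution n left right → Spec_solution n left right (solution n left right)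

-- ===== LEMMAS AND PROOFS =====

-- the value A appends for flat index k
def valA (n k : Int) : Int := max (PySem.Int.floordiv k n) (PySem.Int.mod k n) + 1

-- what B's loop body appends for one row
def seg (n left right row : Int) : List Int :=
  let base := row * n
  let lo := max left base - base
  let hi := min right (base + n - 1) - base
  let runEnd := min hi row
  (if lo ≤ runEnd then List.replicate (runEnd - lo + 1).toNat (row + 1) else [])
    ++ (PySem.List.pyRange (max lo (row + 1)) (hi + 1) 1).map (fun col => col + 1)

lemma solution_eq_map (n left right : Int) :
    solution n left right = (PySem.List.pyRange left (right + 1) 1).map (valA n) := by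
  unfold solution valA
  rw [PySem.List.foldl_append_singleton_eq_map]
  simp

lemma alt_eq_flatMap (n left right : Int) :
    solution_alt n left right =
      if left > right then []
      else (PySem.List.pyRange (PySem.Int.floordiv left n) (PySem.Int.floordiv right n + 1) 1).flatMap
        (seg n left right) := by
  unfold solution_alt
  split
  · rfl
  · have h2 : ∀ l : List Int,
        l.foldl (fun a row => a ++ seg n left right row) [] = l.flatMap (seg n left right) := by
      intro l
      rw [PySem.List.foldl_append_eq_flatMap]
      simp
    rw [← h2]
    congr 1
    funext a row
    simp only [seg]
    by_cases h : max left (row * n) - row * n ≤ min (min right (row * n + n - 1) - row * n) row <;>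
      simp [h, List.append_assoc]

lemma valA_row {n row col : Int} (hn : 0 < n) (h0 : 0 ≤ col) (h1 : col < n) :
    valA n (row * n + col) = max row col + 1 := by
  have hd : PySem.Int.floordiv (row * n + col) n = row := by
    rw [PySem.Int.floordiv_eq_iff_of_pos hn]
    constructor
    · linarith
    · nlinarith
  have hm : PySem.Int.mod (row * n + col) n = col := by
    have := PySem.Int.floordiv_mul_add_mod (row * n + col) n
    rw [hd] at this
    linarith
  unfold valA
  rw [hd, hm]

-- one row's segment is exactly the map of A's value over that row's flat sub-window
lemma seg_eq_map (n : Int) (hn : 1 ≤ n) (left right row : Int) :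
    seg n left right row =
      (PySem.List.pyRange (max left (row * n)) (min right (row * n + n - 1) + 1) 1).map (valA n) := by
  have hn' : (0:Int) < n := hn
  simp only [seg]
  set base := row * n with hbase
  set a' := max left base with ha'
  set b' := min right (base + n - 1) with hb'
  have hbase_le : base ≤ a' := le_max_right _ _
  have hb'_le : b' ≤ base + n - 1 := min_le_right _ _
  by_cases hab : b' < a'
  · -- empty window for this row: all three lists are empty
    have h1 : PySem.List.pyRange a' (b' + 1) 1 = [] := PySem.List.pyRange_one_eq_nil (by omega)
    have h2 : PySem.List.pyRange (max (a' - base) (row + 1)) (b' - base + 1) 1 = [] :=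
      PySem.List.pyRange_one_eq_nil (by omega)
    rw [h1, h2, if_neg (by omega)]
    simp
  · have hab' : a' ≤ b' := by omega
    set e := min b' (base + row) with he
    set m := max a' (e + 1) with hm
    rw [PySem.List.pyRange_one_append a' m (b' + 1) (le_max_left _ _) (by omega), List.map_append]
    congr 1
    · -- constant run
      by_cases hrun : a' - base ≤ min (b' - base) row
      · have hme : m = e + 1 := by omega
        rw [if_pos hrun, hme]
        refine (List.eq_replicate_iff.mpr ⟨?_, ?_⟩).symm
        · simp [PySem.List.length_pyRange_one]
          omega
        · intro x hx
          simp only [List.mem_map] at hx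
          obtain ⟨k, hk, hkx⟩ := hx
          rw [PySem.List.mem_pyRange_one] at hk
          have h0 : (0:Int) ≤ k - base := by omega
          have h1 : k - base < n := by omega
          have hk2 : k = row * n + (k - base) := by rw [← hbase]; ring
          calc x = valA n k := hkx.symm
            _ = valA n (row * n + (k - base)) := by rw [← hk2]
            _ = max row (k - base) + 1 := valA_row hn' h0 h1
            _ = row + 1 := by omega
      · rw [if_neg hrun]
        have hme : m = a' := by omega
        rw [hme, PySem.List.pyRange_one_eq_nil (le_refl _)]
        simp
    · -- increasing tail
      by_cases hrow : b' - base ≤ row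
      · -- tail empty on both sides
        have hme : m = b' + 1 := by omega
        have h1 : PySem.List.pyRange (max (a' - base) (row + 1)) (b' - base + 1) 1 = [] :=
          PySem.List.pyRange_one_eq_nil (by omega)
        rw [hme, h1, PySem.List.pyRange_one_eq_nil (le_refl _)]
        simp
      · set c0 := max (a' - base) (row + 1) with hc0
        have hmc : m = base + c0 := by omega
        have hend : b' + 1 = base + (b' - base + 1) := by ring
        rw [hmc, hend, PySem.List.pyRange_one, PySem.List.pyRange_one]
        have hlen : (base + (b' - base + 1) - (base + c0)).toNat = (b' - base + 1 - c0).toNat := by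
          omega
        rw [hlen, List.map_map, List.map_map]
        symm
        apply List.map_congr_left
        intro k hk
        rw [List.mem_range] at hk
        have hkI : (k:Int) < b' - base + 1 - c0 := by omega
        simp only [Function.comp_apply]
        have h0 : (0:Int) ≤ c0 + k := by omega
        have h1 : c0 + (k:Int) < n := by omega
        calc valA n (base + c0 + k) = valA n (row * n + (c0 + k)) := by rw [← hbase]; ring_nf
          _ = max row (c0 + k) + 1 := valA_row hn' h0 h1
          _ = c0 + (k:Int) + 1 := by omega

-- seg does not depend on left once left is at or below the row's first flat index
lemma seg_left_irrel {n left left' right row : Int} (h : left ≤ row * n) (h' : left' ≤ row * n) :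
    seg n left right row = seg n left' right row := by
  simp only [seg]
  rw [max_eq_right h, max_eq_right h']

-- main induction: grouping the flat window by rows reproduces the flat map
lemma main_lemma (n right : Int) (hn : 1 ≤ n) :
    ∀ (d : Nat) (left : Int), left ≤ right →
      (PySem.Int.floordiv right n - PySem.Int.floordiv left n).toNat = d →
      (PySem.List.pyRange left (right + 1) 1).map (valA n) =
        (PySem.List.pyRange (PySem.Int.floordiv left n) (PySem.Int.floordiv right n + 1) 1).flatMap
          (seg n left right) := by
  have hn' : (0:Int) < n := hn
  intro d
  induction d with
  | zero =>
    intro left hlr hd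
    set r0 := PySem.Int.floordiv left n with hr0
    set r1 := PySem.Int.floordiv right n with hr1
    have hbl := (PySem.Int.floordiv_eq_iff_of_pos hn' (a := left) (q := r0)).mp hr0.symm
    have hbr := (PySem.Int.floordiv_eq_iff_of_pos hn' (a := right) (q := r1)).mp hr1.symm
    have hle : r0 ≤ r1 := by
      have hmul : r0 * n < (r1 + 1) * n := by linarith [hbl.1, hbr.2]
      have := lt_of_mul_lt_mul_right hmul (le_of_lt hn')
      omega
    have heq : r1 = r0 := by omega
    rw [heq, PySem.List.pyRange_one_singleton]
    rw [List.flatMap_cons, List.flatMap_nil, List.append_nil]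
    rw [seg_eq_map n hn left right r0]
    have h1 : max left (r0 * n) = left := max_eq_left hbl.1
    have h2 : min right (r0 * n + n - 1) = right := by
      apply min_eq_left
      have hexp : (r0 + 1) * n = r0 * n + n := by ring
      have h3 : right < r0 * n + n := by rw [← hexp, ← heq]; exact hbr.2
      have h4 := Int.lt_iff_add_one_le.mp h3
      linarith
    rw [h1, h2]
  | succ d ih =>
    intro left hlr hd
    set r0 := PySem.Int.floordiv left n with hr0
    set r1 := PySem.Int.floordiv right n with hr1
    have hbl := (PySem.Int.floordiv_eq_iff_of_pos hn' (a := left) (q := r0)).mp hr0.symm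
    have hbr := (PySem.Int.floordiv_eq_iff_of_pos hn' (a := right) (q := r1)).mp hr1.symm
    have hlt : r0 < r1 := by omega
    have hexp : (r0 + 1) * n = r0 * n + n := by ring
    have hll' : left < (r0 + 1) * n := hbl.2
    have hstep : (r0 + 1) * n ≤ r1 * n :=
      mul_le_mul_of_nonneg_right (by omega) (le_of_lt hn')
    have hl'r : (r0 + 1) * n ≤ right := le_trans hstep hbr.1
    have hfd : PySem.Int.floordiv ((r0 + 1) * n) n = r0 + 1 := by
      rw [PySem.Int.floordiv_eq_iff_of_pos hn']
      constructor
      · exact le_refl _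
      · nlinarith
    rw [PySem.List.pyRange_one_append left ((r0 + 1) * n) (right + 1) (le_of_lt hll')
        (by linarith), List.map_append]
    rw [PySem.List.pyRange_one_cons (by omega : r0 < r1 + 1), List.flatMap_cons]
    congr 1
    · -- first row
      rw [seg_eq_map n hn left right r0]
      have h1 : max left (r0 * n) = left := max_eq_left hbl.1
      have h2 : min right (r0 * n + n - 1) = r0 * n + n - 1 := min_eq_right (by linarith)
      rw [h1, h2, show r0 * n + n - 1 + 1 = (r0 + 1) * n from by ring]
    · -- remaining rows, via the induction hypothesis at (r0+1)*n
      have hmeas : (r1 - PySem.Int.floordiv ((r0 + 1) * n) n).toNat = d := by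
        rw [hfd]; omega
      have hih := ih ((r0 + 1) * n) hl'r hmeas
      rw [hfd] at hih
      rw [hih]
      apply List.flatMap_congr
      intro row hrow
      rw [PySem.List.mem_pyRange_one] at hrow
      have hr : (r0 + 1) * n ≤ row * n :=
        mul_le_mul_of_nonneg_right hrow.1 (le_of_lt hn')
      exact seg_left_irrel hr (le_trans (le_of_lt hll') hr)

-- ===== VERDICT (by name: the statement is the Claim_ definition above) =====
theorem solution_spec : Claim_equal_solution := by
  intro n left right _ hpre
  unfold Spec_solution
  by_cases hlr : right < left
  · rw [solution_eq_map, alt_eq_flatMap, if_pos (by omega)]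
    rw [PySem.List.pyRange_one_eq_nil (by omega)]
    simp
  · have hlr' : left ≤ right := by omega
    have hn : 1 ≤ n := by
      rcases hpre with h | h
      · exact h
      · omega
    rw [solution_eq_map, alt_eq_flatMap, if_neg (by omega)]
    exact main_lemma n right hn _ left hlr' rfl
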